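-- pv_equiv track=rewrite | github.com/juanferml/ProyectoParcial1 | main.py | evaluar_formula
-- ===== SOURCE A (Python) =====
-- def cadena_a_lista(cadena: str, ignorar: set) -> list[str]:
--     return [caracter for caracter in cadena if caracter not in ignorar]
--
-- def generar_valoraciones(atomos):
--     cantidadAtomos = len(atomos)
--     total_combinaciones = 2 ** cantidadAtomos
--     valoraciones = []
--
--     for i in range(total_combinaciones):
--         combinacion = {}
--         divisor = total_combinaciones // 2
--         for j in range(cantidadAtomos):
--             if (i // divisor) % 2 == 0:
--                 combinacion[atomos[j]] = False
--             else:
--                 combinacion[atomos[j]] = True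
--             divisor //= 2
--         valoraciones.append(combinacion)
--     return valoraciones
--
-- def valorar_expresion(expresion: list, valores_verdad: dict, izq: int, der: int):
--     resultado = -1
--     if izq == der:
--         return valores_verdad.get(expresion[izq], -1)  # Devuelve -1 si el átomo no está definido
--     elif expresion[izq] == '!':
--         resultado = valorar_expresion(expresion, valores_verdad, izq + 1, der)
--         return -1 if resultado == -1 else (0 if resultado else 1)
--     elif expresion[izq] == '(' and expresion[der] == ')':
--         contador_parentesis = 0
--         i, operador_medio = izq + 1, -1
--         while i < der and operador_medio == -1:
--             if expresion[i] == '(':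
--                 contador_parentesis += 1
--             elif expresion[i] == ')':
--                 contador_parentesis -= 1
--             if expresion[i] in {'&', '|'} and contador_parentesis == 0:
--                 operador_medio = i
--             i += 1
--
--         if operador_medio == -1:
--             return -1  # Expresión inválida
--
--         izquierda = valorar_expresion(expresion, valores_verdad, izq + 1, operador_medio - 1)
--         derecha = valorar_expresion(expresion, valores_verdad, operador_medio + 1, der - 1)
--
--         if expresion[operador_medio] == '&':
--             resultado = izquierda and derecha
--             if resultado == True:
--                 resultado = 1
--             elif resultado == False:
--                 resultado = 0
--         elif expresion[operador_medio] == '|':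
--             resultado = izquierda or derecha
--             if resultado == True:
--                 resultado = 1
--             elif resultado == False:
--                 resultado == 0
--
--     return resultado  # Si no cumple ninguna condición válida, es una expresión inválida
--
-- def evaluar_formula(formula: str, atomos: list):
--     expresion = cadena_a_lista(formula, {' '})
--     valoraciones_posibles = generar_valoraciones(atomos)
--     resultados = set()
--
--     for valores_verdad in valoraciones_posibles:
--         resultado = valorar_expresion(expresion, valores_verdad, 0, len(expresion) - 1)
--         if resultado == -1:
--             return -1  # Expresión inválida
--         resultados.add(resultado)
--
--     if len(resultados) == 1:
--         return 1 if True in resultados else 0  # Tautología o contradicción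
--     return -1  # Contingencia
-- ===== SOURCE B (Python) =====
-- def _parse(expr, izq, der):
--     # grammar: leaf char | '!' expr | '(' expr op expr ')' with op = first top-level '&'/'|'
--     if izq == der:
--         return ('var', expr[izq])
--     if expr[izq] == '!':
--         return ('not', _parse(expr, izq + 1, der))
--     if expr[izq] == '(' and expr[der] == ')':
--         depth = 0
--         for i in range(izq + 1, der):
--             if expr[i] == '(':
--                 depth += 1
--             elif expr[i] == ')':
--                 depth -= 1
--             if depth == 0 and expr[i] in ('&', '|'):
--                 kind = 'and' if expr[i] == '&' else 'or'
--                 return (kind, _parse(expr, izq + 1, i - 1), _parse(expr, i + 1, der - 1))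
--         return ('bad',)
--     return ('bad',)
--
-- def _eval(t, env):
--     # trit values: -1 invalid, 0 false, 1 true (matches A's and/or on -1)
--     op = t[0]
--     if op == 'bad':
--         return -1
--     if op == 'var':
--         return env.get(t[1], -1)
--     if op == 'not':
--         r = _eval(t[1], env)
--         return r if r == -1 else 1 - r
--     a = _eval(t[1], env)
--     b = _eval(t[2], env)
--     if op == 'and':
--         return 0 if a == 0 else b
--     return a if a != 0 else b  # 'or'
--
-- def evaluar_formula(formula: str, atomos: list):
--     expr = [c for c in formula if c != ' ']
--     if not expr:
--         return -1
--     tree = _parse(expr, 0, len(expr) - 1)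
--     n = len(atomos)
--     results = set()
--     for i in range(2 ** n):
--         env = {atomos[j]: (i >> (n - 1 - j)) & 1 for j in range(n)}
--         r = _eval(tree, env)
--         if r == -1:
--             return -1
--         results.add(r)
--     return results.pop() if len(results) == 1 else -1
-- ===== Notes on version B (the rewrite author's own statement) =====
-- stated objective: faster
-- what changed: B parses the formula once into an AST and evaluates that AST per valuation (with valuations built by shift-and-mask instead of A's precomputed list of divisor-halving dicts), instead of A's re-scanning of the character list recursively for every one of the 2^n valuations.
import Mathlib
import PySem

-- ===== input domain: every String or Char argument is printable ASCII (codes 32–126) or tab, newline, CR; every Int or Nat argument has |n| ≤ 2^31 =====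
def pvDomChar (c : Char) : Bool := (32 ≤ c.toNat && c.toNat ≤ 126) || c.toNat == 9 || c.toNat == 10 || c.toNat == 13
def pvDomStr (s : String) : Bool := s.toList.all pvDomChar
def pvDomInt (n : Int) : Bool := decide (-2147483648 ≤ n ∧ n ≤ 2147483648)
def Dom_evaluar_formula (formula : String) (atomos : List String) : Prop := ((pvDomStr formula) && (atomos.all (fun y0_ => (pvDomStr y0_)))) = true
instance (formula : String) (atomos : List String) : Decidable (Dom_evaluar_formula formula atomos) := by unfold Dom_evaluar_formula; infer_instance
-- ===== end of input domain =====

-- B parses the formula once into an AST and evaluates that AST per valuation (A re-scans the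
-- character list for every one of the 2^n valuations); same return value, measured speed advisory.
-- Python truth values are encoded as Int throughout both ports: False ≡ 0, True ≡ 1 (Python's
-- bool is an int; every ==/and/or/set operation A performs respects that identification).

-- ===== PORT A =====
-- cadena_a_lista(formula, {' '}): keep characters not in the ignore set {' '}
def pvExprA (formula : String) : List Char :=
  formula.toList.filter (fun c => !([' '].contains c))

-- inner loop of generar_valoraciones for row i: state (combinacion, divisor), divisor starts at total // 2
def pvCombinacion (atomos : List String) (total i : Nat) : PySem.Dict String Int :=
  ((List.range atomos.length).foldl
    (fun (st : PySem.Dict String Int × Nat) j =>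
      let d := if (i / st.2) % 2 == 0 then st.1.insert (atomos.getD j "") 0
               else st.1.insert (atomos.getD j "") 1
      (d, st.2 / 2))
    (PySem.Dict.empty, total / 2)).1

def pvGenerar (atomos : List String) : List (PySem.Dict String Int) :=
  let total := 2 ^ atomos.length
  (List.range total).map (fun i => pvCombinacion atomos total i)

-- the 'while i < der and operador_medio == -1' scan; om = -1 ↦ none.  fuel ≥ der - i always
-- (we pass der), so the fuel guard is never the reason for none.  Indices read are < der ≤
-- len e - 1, so the getD default is never read.
def pvScanA (e : List Char) (der : Nat) : Nat → Nat → Int → Option Nat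
  | 0, _, _ => none
  | fuel+1, i, cnt =>
    if i < der then
      let c := e.getD i ' '
      let cnt' := if c == '(' then cnt + 1 else if c == ')' then cnt - 1 else cnt
      if (c == '&' || c == '|') && cnt' == 0 then some i
      else pvScanA e der fuel (i+1) cnt'
    else none

-- valorar_expresion; fuel bounds the recursion depth (≤ e.length + 1 on every reachable call,
-- and we pass e.length + 2), so the fuel branch is unreachable.
def pvValorar (e : List Char) (v : PySem.Dict String Int) : Nat → Nat → Nat → Int
  | 0, _, _ => -1
  | fuel+1, izq, der =>
    if izq == der then (v.get? (String.ofList [e.getD izq ' '])).getD (-1)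
    else if e.getD izq ' ' == '!' then
      let r := pvValorar e v fuel (izq+1) der
      if r == -1 then -1 else if r == 0 then 1 else 0      -- '0 if resultado else 1'
    else if e.getD izq ' ' == '(' && e.getD der ' ' == ')' then
      match pvScanA e der der (izq+1) 0 with
      | none => -1
      | some om =>
        let l := pvValorar e v fuel (izq+1) (om-1)
        let r := pvValorar e v fuel (om+1) (der-1)
        if e.getD om ' ' == '&' then (if l == 0 then l else r)        -- 'l and r' (True↦1/False↦0 is the identity here)
        else if e.getD om ' ' == '|' then (if l == 0 then r else l)   -- 'l or r'
        else -1
    else -1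

-- the main loop over valoraciones_posibles, with the post-loop classification at []
def pvLoopA (e : List Char) : List (PySem.Dict String Int) → PySem.Set Int → Int
  | [], s => if s.length == 1 then (if PySem.Set.contains s 1 then 1 else 0) else -1
  | v :: rest, s =>
    let r := pvValorar e v (e.length + 2) 0 (e.length - 1)
    if r == -1 then -1 else pvLoopA e rest (PySem.Set.add s r)

def evaluar_formula (formula : String) (atomos : List String) : Int :=
  pvLoopA (pvExprA formula) (pvGenerar atomos) PySem.Set.empty

-- ===== PORT B =====
inductive PF : Type
  | bad : PF
  | var : Char → PF
  | pnot : PF → PF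
  | pand : PF → PF → PF
  | por : PF → PF → PF
deriving DecidableEq, Repr

-- B's 'for i in range(izq+1, der)' operator scan (early return); same fuel discipline as pvScanA
def pvScanB (e : List Char) (der : Nat) : Nat → Nat → Int → Option Nat
  | 0, _, _ => none
  | fuel+1, i, depth =>
    if i < der then
      let c := e.getD i ' '
      let depth' := if c == '(' then depth + 1 else if c == ')' then depth - 1 else depth
      if depth' == 0 && (c == '&' || c == '|') then some i
      else pvScanB e der fuel (i+1) depth'
    else none

-- _parse; fuel bounds the recursion depth exactly as in pvValorar
def pvParse (e : List Char) : Nat → Nat → Nat → PF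
  | 0, _, _ => .bad
  | fuel+1, izq, der =>
    if izq == der then .var (e.getD izq ' ')
    else if e.getD izq ' ' == '!' then .pnot (pvParse e fuel (izq+1) der)
    else if e.getD izq ' ' == '(' && e.getD der ' ' == ')' then
      match pvScanB e der der (izq+1) 0 with
      | none => .bad
      | some om =>
        if e.getD om ' ' == '&' then .pand (pvParse e fuel (izq+1) (om-1)) (pvParse e fuel (om+1) (der-1))
        else .por (pvParse e fuel (izq+1) (om-1)) (pvParse e fuel (om+1) (der-1))
    else .bad

-- _eval on the trit encoding (-1 invalid, 0 false, 1 true)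
def pvEval (v : PySem.Dict String Int) : PF → Int
  | .bad => -1
  | .var c => (v.get? (String.ofList [c])).getD (-1)
  | .pnot t => let r := pvEval v t; if r == -1 then r else 1 - r
  | .pand a b => let x := pvEval v a; let y := pvEval v b; if x == 0 then 0 else y
  | .por a b => let x := pvEval v a; let y := pvEval v b; if x != 0 then x else y

-- the dict comprehension {atomos[j]: (i >> (n-1-j)) & 1 for j in range(n)}
def pvEnv (atomos : List String) (i : Nat) : PySem.Dict String Int :=
  (List.range atomos.length).foldl
    (fun d j => d.insert (atomos.getD j "") (((i >>> (atomos.length - 1 - j)) &&& 1 : Nat) : Int))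
    PySem.Dict.empty

-- B's main loop over range(2**n), with 'results.pop() if len(results)==1 else -1' at []
def pvLoopB (atomos : List String) (t : PF) : List Nat → PySem.Set Int → Int
  | [], s => if s.length == 1 then s.headD (-1) else -1
  | i :: rest, s =>
    let r := pvEval (pvEnv atomos i) t
    if r == -1 then -1 else pvLoopB atomos t rest (PySem.Set.add s r)

def evaluar_formula_alt (formula : String) (atomos : List String) : Int :=
  let e := formula.toList.filter (fun c => c != ' ')
  if e.isEmpty then -1
  else pvLoopB atomos (pvParse e (e.length + 2) 0 (e.length - 1))
         (List.range (2 ^ atomos.length)) PySem.Set.empty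

-- ===== PRECONDITION & SPEC =====
-- Pre_ excludes only formulas whose non-space content is empty: there A raises IndexError.
def Pre_evaluar_formula (formula : String) (atomos : List String) : Prop :=
  formula.toList.filter (fun c => c != ' ') ≠ []
instance (formula : String) (atomos : List String) : Decidable (Pre_evaluar_formula formula atomos) := by
  unfold Pre_evaluar_formula; infer_instance

def pvWitness_evaluar_formula : String × List String := ("(p|!p)", ["p"])

def Spec_evaluar_formula (formula : String) (atomos : List String) (out : Int) : Prop := out = evaluar_formula_alt formula atomos
instance (formula : String) (atomos : List String) (out : Int) : Decidable (Spec_evaluar_formula formula atomos out) := by unfold Spec_evaluar_formula; infer_instance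

-- ===== CLAIM (what is proved, stated in full; the proofs are below) =====
def Claim_equal_evaluar_formula : Prop := ∀ (formula : String) (atomos : List String), Dom_evaluar_formula formula atomos → Pre_evaluar_formula formula atomos → Spec_evaluar_formula formula atomos (evaluar_formula formula atomos)

-- ===== LEMMAS AND PROOFS =====

lemma pv_scan_eq (e : List Char) (der : Nat) :
    ∀ fuel i cnt, pvScanB e der fuel i cnt = pvScanA e der fuel i cnt := by
  intro fuel
  induction fuel with
  | zero => intro i cnt; rfl
  | succ n ih =>
    intro i cnt
    simp only [pvScanA, pvScanB, ih]
    by_cases h : i < der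
    · simp only [h, if_true]
      rw [Bool.and_comm]
    · simp [h]

lemma pv_scanA_some (e : List Char) (der : Nat) :
    ∀ fuel i cnt om, pvScanA e der fuel i cnt = some om →
      (e.getD om ' ' == '&') = true ∨ (e.getD om ' ' == '|') = true := by
  intro fuel
  induction fuel with
  | zero => intro i cnt om h; simp [pvScanA] at h
  | succ n ih =>
    intro i cnt om h
    simp only [pvScanA] at h
    by_cases hi : i < der
    · simp only [hi, if_true] at h
      by_cases hcond : ((e.getD i ' ' == '&' || e.getD i ' ' == '|') &&
          ((if e.getD i ' ' == '(' then cnt + 1 else if e.getD i ' ' == ')' then cnt - 1 else cnt) == 0)) = true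
      · rw [if_pos hcond] at h
        cases h
        rcases Bool.and_eq_true .. |>.mp hcond with ⟨hor, _⟩
        exact Bool.or_eq_true_iff.mp hor
      · rw [if_neg hcond] at h
        exact ih _ _ _ h
    · simp [hi] at h

lemma pv_env_items (atomos : List String) (i : Nat) :
    ∀ p ∈ (pvEnv atomos i).items, p.2 = 0 ∨ p.2 = 1 := by
  unfold pvEnv
  have main : ∀ (l : List Nat) (d : PySem.Dict String Int),
      (∀ p ∈ d.items, p.2 = 0 ∨ p.2 = 1) →
      ∀ p ∈ (l.foldl (fun d j => d.insert (atomos.getD j "")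
          (((i >>> (atomos.length - 1 - j)) &&& 1 : Nat) : Int)) d).items, p.2 = 0 ∨ p.2 = 1 := by
    intro l
    induction l with
    | nil => intro d hd; exact hd
    | cons j rest ih =>
      intro d hd
      simp only [List.foldl_cons]
      refine ih _ ?_
      intro p hp
      rcases (PySem.Dict.mem_items_insert _ _ _ _).mp hp with h | ⟨h, _⟩
      · subst h
        have : (i >>> (atomos.length - 1 - j)) &&& 1 = (i >>> (atomos.length - 1 - j)) % 2 :=
          Nat.and_one_is_mod _
        rcases Nat.mod_two_eq_zero_or_one (i >>> (atomos.length - 1 - j)) with h2 | h2 <;>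
          simp [this, h2]
      · exact hd _ h
  intro p hp
  exact main _ _ (by intro p hp; simp [PySem.Dict.empty] at hp) p hp

lemma pv_eval_range (v : PySem.Dict String Int)
    (hv : ∀ p ∈ v.items, p.2 = 0 ∨ p.2 = 1) :
    ∀ t, pvEval v t = -1 ∨ pvEval v t = 0 ∨ pvEval v t = 1 := by
  intro t
  induction t with
  | bad => left; rfl
  | var c =>
    simp only [pvEval]
    cases hg : v.get? (String.ofList [c]) with
    | none => left; rfl
    | some x =>
      have hm := hv _ (PySem.Dict.mem_items_of_get?_eq_some _ hg)
      rcases hm with h | h <;> [(have h' : x = 0 := h); (have h' : x = 1 := h)] <;> simp [h']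
  | pnot t iht =>
    simp only [pvEval]
    rcases iht with h | h | h <;> simp [h]
  | pand a b iha ihb =>
    simp only [pvEval]
    rcases iha with h | h | h <;> rcases ihb with h2 | h2 | h2 <;> simp [h, h2]
  | por a b iha ihb =>
    simp only [pvEval]
    rcases iha with h | h | h <;> rcases ihb with h2 | h2 | h2 <;> simp [h, h2]

lemma pv_valorar_eq_eval (e : List Char) (v : PySem.Dict String Int)
    (hv : ∀ p ∈ v.items, p.2 = 0 ∨ p.2 = 1) :
    ∀ fuel izq der, pvValorar e v fuel izq der = pvEval v (pvParse e fuel izq der) := by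
  intro fuel
  induction fuel with
  | zero => intro izq der; rfl
  | succ n ih =>
    intro izq der
    simp only [pvValorar, pvParse, pv_scan_eq]
    by_cases h1 : (izq == der) = true
    · simp only [h1, if_true]; rfl
    · simp only [h1, if_false, Bool.false_eq_true]
      by_cases h2 : (e.getD izq ' ' == '!') = true
      · simp only [h2, if_true]
        rw [ih]
        rcases pv_eval_range v hv (pvParse e n (izq+1) der) with h | h | h <;>
          simp [pvEval, h]
      · simp only [h2, if_false, Bool.false_eq_true]
        by_cases h3 : (e.getD izq ' ' == '(' && e.getD der ' ' == ')') = true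
        · simp only [h3, if_true]
          cases hscan : pvScanA e der der (izq+1) 0 with
          | none => rfl
          | some om =>
            simp only [ih]
            rcases pv_scanA_some e der _ _ _ _ hscan with hop | hop
            · simp only [hop, if_true]
              by_cases hL : (pvEval v (pvParse e n (izq+1) (om-1)) == 0) = true
              · have hL' := eq_of_beq hL
                simp [pvEval, hL']
              · simp [pvEval, hL]
            · by_cases hamp : (e.getD om ' ' == '&') = true
              · have h1' := eq_of_beq hamp
                have h2' := eq_of_beq hop
                rw [h2'] at h1'
                exact absurd h1' (by decide)
              · simp only [hamp, hop, if_true, if_false, Bool.false_eq_true]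
                simp only [pvEval]
                by_cases hL : (pvEval v (pvParse e n (izq+1) (om-1)) == 0) = true
                · have hL' := eq_of_beq hL
                  simp [hL', bne]
                · have hL' : pvEval v (pvParse e n (izq+1) (om-1)) ≠ 0 := by
                    intro hc; exact hL (by simp [hc])
                  simp [hL, bne]
        · rw [if_neg h3, if_neg h3]; rfl

lemma pv_comb_eq_env (atomos : List String) (i : Nat) :
    pvCombinacion atomos (2 ^ atomos.length) i = pvEnv atomos i := by
  unfold pvCombinacion pvEnv
  rcases Nat.eq_zero_or_pos atomos.length with h0 | hpos
  · simp [h0]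
  · have main : ∀ (k j : Nat) (d : PySem.Dict String Int) (dv : Nat),
        j + k = atomos.length → (k = 0 ∨ dv = 2 ^ (atomos.length - 1 - j)) →
        ((List.range' j k).foldl
          (fun (st : PySem.Dict String Int × Nat) j' =>
            let d' := if (i / st.2) % 2 == 0 then st.1.insert (atomos.getD j' "") 0
                      else st.1.insert (atomos.getD j' "") 1
            (d', st.2 / 2)) (d, dv)).1
          = (List.range' j k).foldl
              (fun d' j' => d'.insert (atomos.getD j' "")
                 (((i >>> (atomos.length - 1 - j')) &&& 1 : Nat) : Int)) d := by
      intro k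
      induction k with
      | zero => intro j d dv _ _; rfl
      | succ m ihk =>
        intro j d dv hsum hdiv
        rcases hdiv with h | h
        · exact absurd h (by omega)
        subst h
        rw [List.range'_succ]
        simp only [List.foldl_cons]
        have hbit : ((i >>> (atomos.length - 1 - j)) &&& 1 : Nat)
            = (i / 2 ^ (atomos.length - 1 - j)) % 2 := by
          rw [Nat.and_one_is_mod, Nat.shiftRight_eq_div_pow]
        have hnext : m = 0 ∨ 2 ^ (atomos.length - 1 - j) / 2 = 2 ^ (atomos.length - 1 - (j+1)) := by
          rcases Nat.eq_zero_or_pos m with hm | hm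
          · exact Or.inl hm
          · right
            have hs : atomos.length - 1 - j = (atomos.length - 1 - (j+1)) + 1 := by omega
            rw [hs, pow_succ, Nat.mul_div_cancel _ (by norm_num)]
        by_cases hb : (i / 2 ^ (atomos.length - 1 - j)) % 2 = 0
        · have hv : ((((i >>> (atomos.length - 1 - j)) &&& 1 : Nat)) : Int) = 0 := by
            rw [hbit, hb]; rfl
          simp only [hb, beq_self_eq_true, if_true, hv]
          exact ihk (j+1) _ _ (by omega) hnext
        · have hb1 : (i / 2 ^ (atomos.length - 1 - j)) % 2 = 1 := by omega
          have hv : ((((i >>> (atomos.length - 1 - j)) &&& 1 : Nat)) : Int) = 1 := by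
            rw [hbit, hb1]; rfl
          have hbeq : ((i / 2 ^ (atomos.length - 1 - j)) % 2 == 0) = false := by
            simp [hb]
          simp only [hbeq, if_false, Bool.false_eq_true, hv]
          exact ihk (j+1) _ _ (by omega) hnext
    have hinit : 2 ^ atomos.length / 2 = 2 ^ (atomos.length - 1 - 0) := by
      have hs : atomos.length = (atomos.length - 1) + 1 := by omega
      rw [Nat.sub_zero]
      conv_lhs => rw [hs]
      rw [pow_succ, Nat.mul_div_cancel _ (by norm_num)]
    rw [List.range_eq_range', hinit]
    exact main atomos.length 0 PySem.Dict.empty _ (by omega) (Or.inr rfl)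

lemma pv_loop_eq (e : List Char) (atomos : List String) :
    ∀ (l : List Nat) (s : PySem.Set Int), (∀ x ∈ s, x = 0 ∨ x = 1) →
      pvLoopA e (l.map (fun i => pvCombinacion atomos (2 ^ atomos.length) i)) s
        = pvLoopB atomos (pvParse e (e.length + 2) 0 (e.length - 1)) l s := by
  intro l
  induction l with
  | nil =>
    intro s hs
    simp only [List.map_nil, pvLoopA, pvLoopB]
    by_cases h1 : (s.length == 1) = true
    · rw [if_pos h1, if_pos h1]
      have hlen : s.length = 1 := by simpa using h1
      obtain ⟨x, rfl⟩ : ∃ x, s = [x] := by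
        cases s with
        | nil => simp at hlen
        | cons a t =>
          cases t with
          | nil => exact ⟨a, rfl⟩
          | cons b t2 => simp at hlen
      rcases hs x (by simp) with h | h <;> subst h <;> rfl
    · rw [if_neg h1, if_neg h1]
  | cons i rest ih =>
    intro s hs
    simp only [List.map_cons, pvLoopA, pvLoopB]
    rw [pv_comb_eq_env atomos i,
        pv_valorar_eq_eval e (pvEnv atomos i) (pv_env_items atomos i) (e.length + 2) 0 (e.length - 1)]
    by_cases hneg : (pvEval (pvEnv atomos i) (pvParse e (e.length+2) 0 (e.length-1)) == -1) = true
    · rw [if_pos hneg, if_pos hneg]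
    · rw [if_neg hneg, if_neg hneg]
      refine ih _ ?_
      intro x hx
      rcases (PySem.Set.mem_add ..).mp hx with h | h
      · exact hs x h
      · subst h
        rcases pv_eval_range (pvEnv atomos i) (pv_env_items atomos i)
            (pvParse e (e.length+2) 0 (e.length-1)) with h | h | h
        · exact absurd (by simpa using h) (by simpa using hneg)
        · exact Or.inl h
        · exact Or.inr h

-- ===== VERDICT (by name: the statements are the Claim_ definitions above) =====
theorem evaluar_formula_spec : Claim_equal_evaluar_formula := by
  intro formula atomos _ hpre
  unfold Spec_evaluar_formula evaluar_formula evaluar_formula_alt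
  have hfe : pvExprA formula = formula.toList.filter (fun c => c != ' ') := by
    unfold pvExprA
    apply List.filter_congr
    intro c _
    simp [bne]
    exact (beq_eq_decide _ _).symm
  have hne : (formula.toList.filter (fun c => c != ' ')).isEmpty = false := by
    rw [List.isEmpty_eq_false_iff]
    exact hpre
  rw [hfe]
  simp only [hne, if_false, Bool.false_eq_true, pvGenerar]
  exact pv_loop_eq _ atomos (List.range (2 ^ atomos.length)) PySem.Set.empty
    (by intro x hx; simp [PySem.Set.empty] at hx)
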